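-- pv_equiv track=rewrite | github.com/wwPDB/py-wwpdb_apps_releasemodule | wwpdb/apps/releasemodule/utils/JournalAbbrev.py | __processJournalAbbrev
-- ===== SOURCE A (Python) =====
-- def __processJournalAbbrev(abbrev):
--     cs = abbrev.lower()
--     newabbrev = ''
--     upper_flag = True
--     for c in cs:
--         if upper_flag:
--             newabbrev += c.upper()
--         else:
--             newabbrev += c
--         #
--         if c < 'a' or c > 'z':
--             upper_flag = True
--         else:
--             upper_flag = False
--         #
--     #
--     return newabbrev
-- ===== SOURCE B (Python) =====
-- def __processJournalAbbrev(abbrev):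
--     # Word-at-a-time algorithm: lowercase the input, then scan it as a sequence of
--     # maximal runs of letters ('words') separated by non-letters; capitalize each
--     # word's first letter and copy separators verbatim (upper() of a non-letter is
--     # the identity, so this matches the per-character flag automaton exactly).
--     cs = abbrev.lower()
--     out = []
--     i = 0
--     n = len(cs)
--     while i < n:
--         if 'a' <= cs[i] <= 'z':
--             j = i + 1
--             while j < n and 'a' <= cs[j] <= 'z':
--                 j += 1
--             out.append(cs[i].upper() + cs[i + 1:j])
--             i = j
--         else:
--             out.append(cs[i])
--             i += 1
--     return ''.join(out)
-- ===== Notes on version B (the rewrite author's own statement) =====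
-- stated objective: alternative
-- what changed: Replaces A's per-character automaton that threads an upper_flag across every character with a run-based scanner: the lowered string is consumed as maximal runs of letters (words) and separators, each word is capitalized as a unit and separators are copied verbatim, relying on upper() being the identity on non-letters.
import Mathlib
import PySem

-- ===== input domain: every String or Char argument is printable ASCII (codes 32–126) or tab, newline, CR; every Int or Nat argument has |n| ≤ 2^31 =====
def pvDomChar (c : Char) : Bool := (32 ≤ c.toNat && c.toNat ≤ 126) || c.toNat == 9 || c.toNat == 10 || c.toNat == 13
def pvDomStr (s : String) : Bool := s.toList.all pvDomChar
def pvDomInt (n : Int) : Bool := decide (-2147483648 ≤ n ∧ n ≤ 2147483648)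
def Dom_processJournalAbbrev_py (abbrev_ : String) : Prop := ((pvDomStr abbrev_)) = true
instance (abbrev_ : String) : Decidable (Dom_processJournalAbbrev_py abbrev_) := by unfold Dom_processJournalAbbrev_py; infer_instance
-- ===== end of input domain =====

-- B replaces A's per-character upper_flag automaton by a run-based scanner: it capitalizes each
-- maximal run of letters as a unit and copies separators verbatim (alternative decomposition, same cost).


-- ===== PORT A =====
-- for-loop over the lowered string, accumulating the string and the upper_flag
def pjaLoop (acc : List Char) (flag : Bool) : List Char → List Char
  | [] => acc
  | c :: rest =>
      pjaLoop (acc ++ [if flag then PySem.Chars.upperChar c else c])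
        (decide (c < 'a' ∨ 'z' < c)) rest

def processJournalAbbrev_py (abbrev_ : String) : String :=
  String.ofList (pjaLoop [] true (PySem.Str.lower abbrev_).toList)

-- ===== PORT B =====
-- 'a' <= c <= 'z' test from Source B
def isLowB (c : Char) : Bool := decide ('a' ≤ c) && decide (c ≤ 'z')

-- the while-loop of Source B: consume a maximal letter run and capitalize it, or copy one separator
def capRuns : List Char → List Char
  | [] => []
  | c :: rest =>
      if isLowB c then
        PySem.Chars.upperChar c :: (rest.takeWhile isLowB ++ capRuns (rest.dropWhile isLowB))
      else
        c :: capRuns rest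
termination_by l => l.length
decreasing_by
  · have := List.length_dropWhile_le (p := isLowB) (l := rest)
    simp; omega
  · simp

def processJournalAbbrev_py_alt (abbrev_ : String) : String :=
  String.ofList (capRuns (PySem.Str.lower abbrev_).toList)

-- ===== PRECONDITION & SPEC =====
def Spec_processJournalAbbrev_py (abbrev_ : String) (out : String) : Prop := out = processJournalAbbrev_py_alt abbrev_
instance (abbrev_ : String) (out : String) : Decidable (Spec_processJournalAbbrev_py abbrev_ out) := by unfold Spec_processJournalAbbrev_py; infer_instance

-- ===== CLAIM (what is proved, stated in full; the proofs are below) =====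
def Claim_equal_processJournalAbbrev_py : Prop := ∀ (abbrev_ : String), Dom_processJournalAbbrev_py abbrev_ → Spec_processJournalAbbrev_py abbrev_ (processJournalAbbrev_py abbrev_)

-- ===== LEMMAS AND PROOFS =====
-- upperChar is the identity off 'a'..'z'
theorem upperChar_of_not_low (c : Char) (h : isLowB c = false) : PySem.Chars.upperChar c = c := by
  simp only [PySem.Chars.upperChar, PySem.Chars.islower]
  split
  · rename_i h1
    simp [isLowB] at h h1
    exact absurd (h h1.1) (not_lt.mpr h1.2)
  · rfl

-- A's flag update is the negation of Source B's letter test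
theorem flag_eq (c : Char) : decide (c < 'a' ∨ 'z' < c) = !(isLowB c) := by
  by_cases h1 : 'a' ≤ c <;> by_cases h2 : c ≤ 'z' <;>
    simp [isLowB, h1, h2, lt_iff_not_ge, ← not_le] at * <;> simp_all

-- the automaton with flag=true computes capRuns, and with flag=false it copies the
-- current letter run and then computes capRuns of the remainder
theorem pja_main : ∀ (n : Nat) (l : List Char), l.length ≤ n →
    (∀ acc, pjaLoop acc true l = acc ++ capRuns l) ∧
    (∀ acc, pjaLoop acc false l = acc ++ l.takeWhile isLowB ++ capRuns (l.dropWhile isLowB)) := by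
  intro n
  induction n with
  | zero =>
      intro l hl
      have : l = [] := List.length_eq_zero_iff.mp (Nat.le_zero.mp hl)
      subst this
      constructor <;> intro acc <;> simp [pjaLoop, capRuns]
  | succ n ih =>
      intro l hl
      cases l with
      | nil => constructor <;> intro acc <;> simp [pjaLoop, capRuns]
      | cons c r =>
          have hr : r.length ≤ n := by simpa using hl
          have hdrop : (r.dropWhile isLowB).length ≤ n :=
            le_trans (List.length_dropWhile_le _ _) hr
          by_cases hc : isLowB c = true
          · constructor <;> intro acc
            · rw [show pjaLoop acc true (c :: r)
                    = pjaLoop (acc ++ [PySem.Chars.upperChar c]) (decide (c < 'a' ∨ 'z' < c)) r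
                  from rfl, flag_eq, hc]
              simp only [Bool.not_true]
              rw [(ih r hr).2]
              simp [capRuns, hc]
            · rw [show pjaLoop acc false (c :: r)
                    = pjaLoop (acc ++ [c]) (decide (c < 'a' ∨ 'z' < c)) r
                  from rfl, flag_eq, hc]
              simp only [Bool.not_true]
              rw [(ih r hr).2]
              simp [List.takeWhile_cons, List.dropWhile_cons, hc]
          · have hc' : isLowB c = false := by simpa using hc
            constructor <;> intro acc
            · rw [show pjaLoop acc true (c :: r)
                    = pjaLoop (acc ++ [PySem.Chars.upperChar c]) (decide (c < 'a' ∨ 'z' < c)) r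
                  from rfl, flag_eq, hc']
              simp only [Bool.not_false]
              rw [(ih r hr).1, upperChar_of_not_low c hc']
              simp [capRuns, hc']
            · rw [show pjaLoop acc false (c :: r)
                    = pjaLoop (acc ++ [c]) (decide (c < 'a' ∨ 'z' < c)) r
                  from rfl, flag_eq, hc']
              simp only [Bool.not_false]
              rw [(ih r hr).1]
              simp [List.takeWhile_cons, List.dropWhile_cons, hc', capRuns]

-- ===== VERDICT (by name: the statement is the Claim_ definition above) =====
theorem processJournalAbbrev_py_spec : Claim_equal_processJournalAbbrev_py := by
  intro abbrev_ _
  unfold Spec_processJournalAbbrev_py processJournalAbbrev_py processJournalAbbrev_py_alt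
  rw [(pja_main ((PySem.Str.lower abbrev_).toList.length) _ le_rfl).1]
  simp
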